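-- pv_equiv track=rewrite | github.com/khalo13/astrology | panchang-python/love.py | get_house_rulership
-- ===== SOURCE A (Python) =====
-- sign_lords_map = {
--     "Aries": "Mars",
--     "Taurus": "Venus",
--     "Gemini": "Mercury",
--     "Cancer": "Moon",
--     "Leo": "Sun",
--     "Virgo": "Mercury",
--     "Libra": "Venus",
--     "Scorpio": "Mars",
--     "Sagittarius": "Jupiter",
--     "Capricorn": "Saturn",
--     "Aquarius": "Saturn",
--     "Pisces": "Jupiter",
-- }
--
-- ZODIAC_SIGNS = [
--     "Aries",
--     "Taurus",
--     "Gemini",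
--     "Cancer",
--     "Leo",
--     "Virgo",
--     "Libra",
--     "Scorpio",
--     "Sagittarius",
--     "Capricorn",
--     "Aquarius",
--     "Pisces",
-- ]
--
-- ZODIAC_SIGN_TO_INDEX = {
--     "Aries": 0,
--     "Taurus": 1,
--     "Gemini": 2,
--     "Cancer": 3,
--     "Leo": 4,
--     "Virgo": 5,
--     "Libra": 6,
--     "Scorpio": 7,
--     "Sagittarius": 8,
--     "Capricorn": 9,
--     "Aquarius": 10,
--     "Pisces": 11,
-- }
--
-- def get_house_rulership(planet, ascendant_sign):
--     """
--     Determine the functional nature of a planet based on house rulership.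
--     BPHS Rules:
--     - Lords of Trikonas (5, 9) are functionally benefic.
--     - Lords of Dusthanas (6, 8, 12) are functionally malefic.
--     - Lords of Kendras (1, 4, 7, 10) are neutral unless owning a benefic/malefic house.
--     - Lords of 3rd and 11th houses are malefic.
--     """
--     # Convert ascendant_sign from string to index
--     ascendant_index = ZODIAC_SIGN_TO_INDEX[ascendant_sign]
--
--     # Map houses to zodiac signs based on ascendant
--     house_to_sign = {
--         1: ascendant_index,
--         2: (ascendant_index + 1) % 12,
--         3: (ascendant_index + 2) % 12,
--         4: (ascendant_index + 3) % 12,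
--         5: (ascendant_index + 4) % 12,
--         6: (ascendant_index + 5) % 12,
--         7: (ascendant_index + 6) % 12,
--         8: (ascendant_index + 7) % 12,
--         9: (ascendant_index + 8) % 12,
--         10: (ascendant_index + 9) % 12,
--         11: (ascendant_index + 10) % 12,
--         12: (ascendant_index + 11) % 12,
--     }
--
--     # Map houses to planets based on their rulership
--     house_to_planet = {
--         house: sign_lords_map[ZODIAC_SIGNS[sign]]
--         for house, sign in house_to_sign.items()
--     }
--
--     # Determine the houses ruled by the planet
--     ruled_houses = [house for house, lord in house_to_planet.items() if lord == planet]
--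
--     # Determine functional nature based on ruled houses
--     if any(house in [5, 9] for house in ruled_houses):  # Trikona lords
--         return "Functional Benefic"
--     if any(house in [6, 8, 12] for house in ruled_houses):  # Dusthana lords
--         return "Functional Malefic"
--     if any(house in [3, 11] for house in ruled_houses):  # Malefic houses
--         return "Functional Malefic"
--     if any(house in [1, 4, 7, 10] for house in ruled_houses):  # Kendras
--         return "Neutral"
--     return "Neutral"
-- ===== SOURCE B (Python) =====
-- ZODIAC_SIGN_TO_INDEX = {
--     "Aries": 0, "Taurus": 1, "Gemini": 2, "Cancer": 3, "Leo": 4, "Virgo": 5,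
--     "Libra": 6, "Scorpio": 7, "Sagittarius": 8, "Capricorn": 9,
--     "Aquarius": 10, "Pisces": 11,
-- }
--
-- ZODIAC_SIGNS = [
--     "Aries", "Taurus", "Gemini", "Cancer", "Leo", "Virgo",
--     "Libra", "Scorpio", "Sagittarius", "Capricorn", "Aquarius", "Pisces",
-- ]
--
-- sign_lords_map = {
--     "Aries": "Mars", "Taurus": "Venus", "Gemini": "Mercury", "Cancer": "Moon",
--     "Leo": "Sun", "Virgo": "Mercury", "Libra": "Venus", "Scorpio": "Mars",
--     "Sagittarius": "Jupiter", "Capricorn": "Saturn", "Aquarius": "Saturn",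
--     "Pisces": "Jupiter",
-- }
--
-- # Houses listed in verdict-priority order (trikonas first, then the malefic houses);
-- # the remaining houses (1,2,4,7,10) are all Neutral so never need checking.
-- _PRIORITY = [
--     (5, "Functional Benefic"), (9, "Functional Benefic"),
--     (6, "Functional Malefic"), (8, "Functional Malefic"), (12, "Functional Malefic"),
--     (3, "Functional Malefic"), (11, "Functional Malefic"),
-- ]
--
-- def get_house_rulership(planet, ascendant_sign):
--     """Early-return scan: walk the decisive houses in verdict-priority order and
--     return the verdict of the first such house the planet rules; otherwise Neutral."""
--     asc = ZODIAC_SIGN_TO_INDEX[ascendant_sign]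
--     for house, verdict in _PRIORITY:
--         if sign_lords_map[ZODIAC_SIGNS[(asc + house - 1) % 12]] == planet:
--             return verdict
--     return "Neutral"
-- ===== Notes on version B (the rewrite author's own statement) =====
-- stated objective: simpler
-- what changed: B replaces A's pipeline (build two 12-entry house dicts, collect the list of houses the planet rules, then run membership tests) by an early-return scan: it walks only the seven decisive houses in verdict-priority order (5,9 then 6,8,12,3,11), computes each house's lord directly from the ascendant offset, and returns the first matching verdict, falling through to Neutral.
import Mathlib
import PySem

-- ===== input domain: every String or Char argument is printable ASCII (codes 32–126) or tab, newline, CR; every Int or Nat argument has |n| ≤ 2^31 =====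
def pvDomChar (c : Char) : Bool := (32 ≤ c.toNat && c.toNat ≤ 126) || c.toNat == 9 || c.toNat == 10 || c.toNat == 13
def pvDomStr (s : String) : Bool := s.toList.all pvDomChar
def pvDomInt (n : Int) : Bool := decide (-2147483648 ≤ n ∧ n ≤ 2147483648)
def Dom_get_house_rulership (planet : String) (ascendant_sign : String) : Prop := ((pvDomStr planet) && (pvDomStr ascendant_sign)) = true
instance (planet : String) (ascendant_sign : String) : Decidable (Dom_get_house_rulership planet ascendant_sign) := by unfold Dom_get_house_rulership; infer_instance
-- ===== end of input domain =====

-- B replaces A's build-ruled-houses-then-classify pipeline by an early-return scan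
-- of the seven decisive houses in verdict-priority order (objective: simpler).

-- ===== PORT A =====
def pvSignLordsMap : PySem.Dict String String := PySem.Dict.ofList
  [("Aries", "Mars"), ("Taurus", "Venus"), ("Gemini", "Mercury"), ("Cancer", "Moon"),
   ("Leo", "Sun"), ("Virgo", "Mercury"), ("Libra", "Venus"), ("Scorpio", "Mars"),
   ("Sagittarius", "Jupiter"), ("Capricorn", "Saturn"), ("Aquarius", "Saturn"), ("Pisces", "Jupiter")]

def pvZodiacSigns : List String :=
  ["Aries", "Taurus", "Gemini", "Cancer", "Leo", "Virgo",
   "Libra", "Scorpio", "Sagittarius", "Capricorn", "Aquarius", "Pisces"]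

def pvZodiacSignToIndex : PySem.Dict String Int := PySem.Dict.ofList
  [("Aries", 0), ("Taurus", 1), ("Gemini", 2), ("Cancer", 3), ("Leo", 4), ("Virgo", 5),
   ("Libra", 6), ("Scorpio", 7), ("Sagittarius", 8), ("Capricorn", 9), ("Aquarius", 10), ("Pisces", 11)]

def get_house_rulership (planet : String) (ascendant_sign : String) : String :=
  match pvZodiacSignToIndex.get? ascendant_sign with
  | none => ""   -- Python raises KeyError here; excluded by Pre_
  | some ascendant_index =>
    let house_to_sign : PySem.Dict Int Int := PySem.Dict.ofList
      [(1, ascendant_index), (2, PySem.Int.mod (ascendant_index + 1) 12),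
       (3, PySem.Int.mod (ascendant_index + 2) 12), (4, PySem.Int.mod (ascendant_index + 3) 12),
       (5, PySem.Int.mod (ascendant_index + 4) 12), (6, PySem.Int.mod (ascendant_index + 5) 12),
       (7, PySem.Int.mod (ascendant_index + 6) 12), (8, PySem.Int.mod (ascendant_index + 7) 12),
       (9, PySem.Int.mod (ascendant_index + 8) 12), (10, PySem.Int.mod (ascendant_index + 9) 12),
       (11, PySem.Int.mod (ascendant_index + 10) 12), (12, PySem.Int.mod (ascendant_index + 11) 12)]
    -- ZODIAC_SIGNS[sign] and sign_lords_map[...] can never raise here (index is always 0..11,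
    -- all 12 signs are keys), so the total getD forms are exact.
    let house_to_planet : PySem.Dict Int String := PySem.Dict.ofList
      (house_to_sign.items.map (fun p =>
        (p.1, pvSignLordsMap.getD (PySem.List.pyGetD pvZodiacSigns p.2 "") "")))
    let ruled_houses : List Int :=
      (house_to_planet.items.filter (fun p => p.2 == planet)).map (·.1)
    if ruled_houses.any (fun h => [(5 : Int), 9].contains h) then "Functional Benefic"
    else if ruled_houses.any (fun h => [(6 : Int), 8, 12].contains h) then "Functional Malefic"
    else if ruled_houses.any (fun h => [(3 : Int), 11].contains h) then "Functional Malefic"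
    else if ruled_houses.any (fun h => [(1 : Int), 4, 7, 10].contains h) then "Neutral"
    else "Neutral"

-- ===== PORT B =====
def pvPriority : List (Int × String) :=
  [(5, "Functional Benefic"), (9, "Functional Benefic"),
   (6, "Functional Malefic"), (8, "Functional Malefic"), (12, "Functional Malefic"),
   (3, "Functional Malefic"), (11, "Functional Malefic")]

-- the for-loop of B: return the verdict of the first priority house the planet rules
def pvScan (planet : String) (asc : Int) : List (Int × String) → String
  | [] => "Neutral"
  | (house, verdict) :: rest =>
    if pvSignLordsMap.getD (PySem.List.pyGetD pvZodiacSigns (PySem.Int.mod (asc + house - 1) 12) "") "" == planet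
    then verdict
    else pvScan planet asc rest

def get_house_rulership_alt (planet : String) (ascendant_sign : String) : String :=
  match pvZodiacSignToIndex.get? ascendant_sign with
  | none => ""   -- KeyError in Python B too; excluded by Pre_
  | some asc => pvScan planet asc pvPriority

-- ===== PRECONDITION & SPEC =====
-- Pre_ excludes only inputs where A raises KeyError: ascendant_sign not one of the 12 zodiac signs.
def Pre_get_house_rulership (planet : String) (ascendant_sign : String) : Prop :=
  ascendant_sign ∈ pvZodiacSigns
instance (planet : String) (ascendant_sign : String) : Decidable (Pre_get_house_rulership planet ascendant_sign) := by unfold Pre_get_house_rulership; infer_instance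
def pvWitness_get_house_rulership : String × String := ("Mars", "Leo")

def Spec_get_house_rulership (planet : String) (ascendant_sign : String) (out : String) : Prop := out = get_house_rulership_alt planet ascendant_sign
instance (planet : String) (ascendant_sign : String) (out : String) : Decidable (Spec_get_house_rulership planet ascendant_sign out) := by unfold Spec_get_house_rulership; infer_instance

-- ===== CLAIM (what is proved, stated in full; the proofs are below) =====
def Claim_equal_get_house_rulership : Prop := ∀ (planet : String) (ascendant_sign : String), Dom_get_house_rulership planet ascendant_sign → Pre_get_house_rulership planet ascendant_sign → Spec_get_house_rulership planet ascendant_sign (get_house_rulership planet ascendant_sign)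

-- ===== LEMMAS AND PROOFS =====

-- the seven lord names occurring in the map
def pvLords : List String := ["Mars", "Venus", "Mercury", "Moon", "Sun", "Jupiter", "Saturn"]

set_option maxHeartbeats 2000000 in
theorem pv_eq_on_lords : ∀ a ∈ pvZodiacSigns, ∀ p ∈ pvLords,
    get_house_rulership p a = get_house_rulership_alt p a := by decide

set_option maxHeartbeats 4000000 in
theorem pv_eq_off_lords : ∀ a ∈ pvZodiacSigns, ∀ p : String, p ∉ pvLords →
    get_house_rulership p a = get_house_rulership_alt p a := by
  intro a ha p hp
  simp [pvLords, List.mem_cons] at hp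
  obtain ⟨h1, h2, h3, h4, h5, h6, h7⟩ := hp
  fin_cases ha <;>
    simp [get_house_rulership, get_house_rulership_alt, pvScan, pvPriority,
      pvSignLordsMap, pvZodiacSignToIndex, pvZodiacSigns,
      PySem.Dict.ofList, PySem.Dict.update, PySem.Dict.empty, PySem.Dict.insert,
      PySem.Dict.contains, PySem.Dict.get?, PySem.Dict.getD,
      beq_iff_eq, PySem.List.pyGetD_ofNat', List.getD, PySem.Int.mod,
      Ne.symm h1, Ne.symm h2, Ne.symm h3, Ne.symm h4, Ne.symm h5, Ne.symm h6, Ne.symm h7]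

-- ===== VERDICT (by name: the statement is the Claim_ definition above) =====
theorem get_house_rulership_spec : Claim_equal_get_house_rulership := by
  intro planet ascendant_sign _ hpre
  unfold Spec_get_house_rulership
  by_cases hp : planet ∈ pvLords
  · exact pv_eq_on_lords _ hpre _ hp
  · exact pv_eq_off_lords _ hpre _ hp
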